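-- pv_equiv track=rewrite | github.com/ljtijhuis/AdventOfCode | 2015/src/day_11.py | increment_one
-- ===== SOURCE A (Python) =====
-- def increment_one(s: str) -> str:
--     carry = 1
--     i = len(s)-1
--     while i >= 0 and carry > 0:
--         carry = 0
--         next_char_num = ord(s[i]) + 1
--         if next_char_num > ord('z'):
--             next_char_num = ord('a')
--             carry = 1
--         s = s[:i] + chr(next_char_num) + s[i+1:]
--         i -= 1
--     if carry > 0:
--         return 'aaaaaaaa'
--     return s
-- ===== SOURCE B (Python) =====
-- def increment_one(s: str) -> str:
--     acc = ''
--     for i in range(len(s) - 1, -1, -1):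
--         c = s[i]
--         if ord(c) < ord('z'):
--             return s[:i] + chr(ord(c) + 1) + acc
--         acc += 'a'
--     return 'aaaaaaaa'
-- ===== Notes on version B (the rewrite author's own statement) =====
-- stated objective: simpler
-- what changed: Replaces the carry flag and per-step string re-slicing with a single right-to-left scan for the pivot (rightmost char below 'z'), building the result once as prefix + incremented char + accumulated 'a's.
import Mathlib
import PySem

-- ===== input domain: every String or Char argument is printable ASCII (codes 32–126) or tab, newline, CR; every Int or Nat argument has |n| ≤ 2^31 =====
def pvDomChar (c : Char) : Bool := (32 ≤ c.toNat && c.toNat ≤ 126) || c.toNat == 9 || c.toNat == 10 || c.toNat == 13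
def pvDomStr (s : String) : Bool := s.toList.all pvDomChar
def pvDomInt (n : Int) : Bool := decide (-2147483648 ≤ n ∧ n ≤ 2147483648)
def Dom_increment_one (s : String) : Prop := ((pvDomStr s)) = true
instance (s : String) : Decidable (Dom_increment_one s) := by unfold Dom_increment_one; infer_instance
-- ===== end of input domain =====

-- B replaces A's carry loop (which re-slices the string each step) by one scan for the
-- rightmost character below 'z' and a single reconstruction; objective: simpler.

-- ===== PORT A =====
-- the while loop: state (s, carry, i); each iteration replaces s[i] and decrements i
def incLoopA (s : List Char) (carry : Int) (i : Int) : List Char × Int :=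
  if h : i ≥ 0 ∧ carry > 0 then
    let c := (PySem.List.pyGet? s i).getD 'a'   -- ord(s[i]); index is always in range here
    let n0 := c.toNat + 1
    let (n, carry') := if n0 > 'z'.toNat then ('a'.toNat, (1 : Int)) else (n0, 0)
    incLoopA (PySem.List.slice s none (some i) ++ [Char.ofNat n] ++ PySem.List.slice s (some (i + 1)) none) carry' (i - 1)
  else (s, carry)
termination_by (i + 1).toNat
decreasing_by omega

def increment_one (s : String) : String :=
  let r := incLoopA s.toList 1 ((s.toList.length : Int) - 1)
  if r.2 > 0 then "aaaaaaaa" else String.mk r.1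

-- ===== PORT B =====
-- Source B's for-loop over i = len(s)-1 .. 0, carrying acc; ported as recursion on the
-- reversed character list (the element at hand is s[i], the rest to its left is s[:i])
def altGo (acc : List Char) : List Char → Option (List Char)
  | [] => none
  | c :: rest =>
    if c.toNat < 'z'.toNat then some (rest.reverse ++ Char.ofNat (c.toNat + 1) :: acc)
    else altGo (acc ++ ['a']) rest

def increment_one_alt (s : String) : String :=
  match altGo [] s.toList.reverse with
  | some t => String.mk t
  | none => "aaaaaaaa"

-- ===== PRECONDITION & SPEC =====
def Spec_increment_one (s : String) (out : String) : Prop := out = increment_one_alt s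
instance (s : String) (out : String) : Decidable (Spec_increment_one s out) := by unfold Spec_increment_one; infer_instance

-- ===== CLAIM (what is proved, stated in full; the proofs are below) =====
def Claim_equal_increment_one : Prop := ∀ (s : String), Dom_increment_one s → Spec_increment_one s (increment_one s)

-- ===== LEMMAS AND PROOFS =====

theorem altGo_acc_irrel (p : List Char) (n : Nat) :
    altGo (List.replicate n 'a' ++ ['a']) p = altGo (List.replicate (n + 1) 'a') p := by
  have : List.replicate n 'a' ++ ['a'] = List.replicate (n + 1) 'a' := by
    simpa using (List.replicate_succ' (n := n) (a := 'a')).symm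
  rw [this]

theorem incLoopA_key (p : List Char) (n : Nat) :
    incLoopA (p ++ List.replicate n 'a') 1 ((p.length : Int) - 1) =
      match altGo (List.replicate n 'a') p.reverse with
      | some t => (t, 0)
      | none => (List.replicate (p.length + n) 'a', 1) := by
  induction p using List.reverseRecOn generalizing n with
  | nil =>
      rw [incLoopA]
      simp [altGo]
  | append_singleton q c ih =>
      rw [incLoopA]
      have hi : (0 : Int) ≤ (q.length : Int) := by positivity
      have hget : PySem.List.pyGet? (q ++ [c] ++ List.replicate n 'a') ((q.length : Int) + 1 - 1)
          = some c := by
        have : ((q.length : Int) + 1 - 1) = ((q.length : Nat) : Int) := by push_cast; ring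
        rw [this, PySem.List.pyGet?_natCast]
        simp
      have hsl1 : PySem.List.slice (q ++ [c] ++ List.replicate n 'a') none (some ((q.length : Int) + 1 - 1))
          = q := by
        have : ((q.length : Int) + 1 - 1) = ((q.length : Nat) : Int) := by push_cast; ring
        rw [this, PySem.List.slice_to_natCast]
        simp
      have hsl2 : PySem.List.slice (q ++ [c] ++ List.replicate n 'a') (some ((q.length : Int) + 1 - 1 + 1)) none
          = List.replicate n 'a' := by
        have : ((q.length : Int) + 1 - 1 + 1) = (((q.length : Nat) + 1 : Nat) : Int) := by push_cast; ring
        rw [this, PySem.List.slice_from_natCast]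
        simp
      simp only [List.length_append, List.length_singleton]
      push_cast
      rw [dif_pos ⟨by omega, by norm_num⟩]
      simp only [hget, hsl1, hsl2, Option.getD_some]
      by_cases hc : c.toNat + 1 > 122
      · -- carry continues: this char becomes 'a'
        rw [if_pos hc]; dsimp only
        have hq : q ++ [Char.ofNat 97] ++ List.replicate n 'a'
            = q ++ List.replicate (n + 1) 'a' := by
          have : (Char.ofNat 97) = 'a' := by decide
          rw [this]
          have : ('a' : Char) :: List.replicate n 'a' = List.replicate (n + 1) 'a' := by
            simp [List.replicate_succ]
          simp [← this]
        have harg : ((q.length : Int) + 1 - 1 - 1) = (q.length : Int) - 1 := by ring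
        rw [hq, harg, ih (n + 1)]
        have hrev : (q ++ [c]).reverse = c :: q.reverse := by simp
        rw [hrev]
        have hcz : ¬ c.toNat < 122 := by omega
        simp only [altGo, altGo_acc_irrel, show 'z'.toNat = 122 from rfl]
        rw [if_neg hcz]
        cases haltres : altGo (List.replicate (n + 1) 'a') q.reverse with
        | some t => simp
        | none =>
            have hlen : q.length + (n + 1) = q.length + 1 + n := by omega
            simp [hlen]
  -- done with carry branch; now the stop branch
      · rw [if_neg hc]; dsimp only
        have harg : ((q.length : Int) + 1 - 1 - 1) = ((q.length : Int)) - 1 := by ring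
        rw [harg, incLoopA]
        rw [dif_neg (by omega)]
        have hrev : (q ++ [c]).reverse = c :: q.reverse := by simp
        rw [hrev]
        have hcz : c.toNat < 122 := by omega
        simp only [altGo, show 'z'.toNat = 122 from rfl, if_pos hcz]
        simp

theorem increment_one_eq_alt (s : String) : increment_one s = increment_one_alt s := by
  unfold increment_one increment_one_alt
  have h := incLoopA_key s.toList 0
  simp only [List.replicate_zero, List.append_nil, Nat.add_zero] at h
  dsimp only
  rw [h]
  cases haltres : altGo [] s.toList.reverse <;> simp

-- ===== VERDICT (by name: the statement is the Claim_ definition above) =====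
theorem increment_one_spec : Claim_equal_increment_one := by
  intro s _
  exact increment_one_eq_alt s
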